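-- pv_equiv track=rewrite | github.com/hangqinlu/SPLR-NER | SPLR/SPLR_nested_ner/eval.py | classify_nested_entities
-- ===== SOURCE A (Python) =====
-- def classify_nested_entities(entity_list):
--     outer_set, inner_set = set(), set()
--     n = len(entity_list)
--     for i in range(n):
--         e1, t1 = entity_list[i][0], entity_list[i][1]
--         is_outer = False
--         is_inner = False
--         for j in range(n):
--             if i == j: continue
--             e2, t2 = entity_list[j][0], entity_list[j][1]
--             if e2 != e1 and e2 in e1:
--                 is_outer = True
--             # 内层判据：自己被别人完全包含
--             if e2 != e1 and e1 in e2: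
--                 is_inner = True
--         if is_outer:
--             outer_set.add((e1, t1))
--         if is_inner:
--             inner_set.add((e1, t1))
--     return outer_set, inner_set
-- ===== SOURCE B (Python) =====
-- def classify_nested_entities(entity_list):
--     # Window-dictionary algorithm: hash the distinct entity strings once and record
--     # the set of lengths that occur; for each string, slide a window of each strictly
--     # shorter occurring length over it and look the window up in the hash set.  A hit
--     # t inside s marks s as outer and t as inner in one stroke; no pair of entities
--     # is ever compared directly.
--     strings = {e for e, _ in entity_list}
--     lengths = {len(s) for s in strings}
--     outer_strs, inner_strs = set(), set()
--     for s in strings: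
--         L = len(s)
--         for ln in lengths:
--             if ln >= L:
--                 continue
--             for i in range(L - ln + 1):
--                 t = s[i:i + ln]
--                 if t in strings:
--                     outer_strs.add(s)
--                     inner_strs.add(t)
--     pairs = set(entity_list)
--     return ({p for p in pairs if p[0] in outer_strs},
--             {p for p in pairs if p[0] in inner_strs})
-- ===== Notes on version B (the rewrite author's own statement) =====
-- stated objective: faster
-- what changed: B replaces A's all-pairs occurrence comparison by a window-dictionary algorithm: it hashes the distinct entity strings and the set of occurring lengths once, then slides a window of each strictly shorter occurring length over each distinct string and looks the window up in the hash set, a hit marking the container as outer and the window as inner; no pair of entities is compared directly.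
import Mathlib
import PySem

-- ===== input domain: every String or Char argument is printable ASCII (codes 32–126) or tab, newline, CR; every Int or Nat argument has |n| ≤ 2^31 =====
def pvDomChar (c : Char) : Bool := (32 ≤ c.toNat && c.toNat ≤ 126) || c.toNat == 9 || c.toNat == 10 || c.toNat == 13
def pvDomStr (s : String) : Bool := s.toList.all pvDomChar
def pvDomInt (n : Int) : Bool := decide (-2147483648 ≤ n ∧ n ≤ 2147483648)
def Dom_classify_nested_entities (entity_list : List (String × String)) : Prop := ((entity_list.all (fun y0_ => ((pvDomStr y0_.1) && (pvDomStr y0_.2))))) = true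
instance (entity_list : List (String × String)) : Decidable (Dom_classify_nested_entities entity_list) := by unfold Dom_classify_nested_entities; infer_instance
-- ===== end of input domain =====

-- B replaces A's all-pairs scan by a substring-dictionary algorithm: it indexes the
-- distinct entity strings once and enumerates each string's substrings, looking each
-- up in the index (objective: faster; B's sets are consumed order-insensitively).

-- ===== PORT A =====
def classify_nested_entities (entity_list : List (String × String)) :
    (List (String × String)) × (List (String × String)) :=
  let n : Int := entity_list.length
  (PySem.List.pyRange 0 n 1).foldl
    (fun (st : PySem.Set (String × String) × PySem.Set (String × String)) i =>
      let e1 := (PySem.List.pyGetD entity_list i ("", "")).1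
      let t1 := (PySem.List.pyGetD entity_list i ("", "")).2
      let fl : Bool × Bool := (PySem.List.pyRange 0 n 1).foldl
        (fun (f : Bool × Bool) j =>
          if i == j then f else
          let e2 := (PySem.List.pyGetD entity_list j ("", "")).1
          ((if e2 ≠ e1 ∧ PySem.Str.isIn e2 e1 then true else f.1),
           (if e2 ≠ e1 ∧ PySem.Str.isIn e1 e2 then true else f.2)))
        (false, false)
      ((if fl.1 then PySem.Set.add st.1 (e1, t1) else st.1),
       (if fl.2 then PySem.Set.add st.2 (e1, t1) else st.2)))
    (PySem.Set.empty, PySem.Set.empty)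

-- ===== PORT B =====
-- Source B iterates over the sets 'strings' and 'lengths'; the result is order-insensitive
-- (the two accumulated sets are consumed only through membership tests), so the port
-- folds over each Set's list in its first-insertion order.
def classify_nested_entities_alt (entity_list : List (String × String)) :
    (List (String × String)) × (List (String × String)) :=
  let strings : PySem.Set String := PySem.Set.ofList (entity_list.map (·.1))
  let lengths : PySem.Set Int := PySem.Set.ofList (strings.map (fun s => PySem.Str.len s))
  let oi : PySem.Set String × PySem.Set String :=
    strings.foldl
      (fun (st : PySem.Set String × PySem.Set String) s =>
        let L : Int := PySem.Str.len s
        lengths.foldl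
          (fun st ln =>
            if ln ≥ L then st
            else
              (PySem.List.pyRange 0 (L - ln + 1) 1).foldl
                (fun st i =>
                  let t := PySem.Str.slice s (some i) (some (i + ln))
                  if PySem.Set.contains strings t then
                    (PySem.Set.add st.1 s, PySem.Set.add st.2 t)
                  else st)
                st)
          st)
      (PySem.Set.empty, PySem.Set.empty)
  let pairs : PySem.Set (String × String) := PySem.Set.ofList entity_list
  (pairs.filter (fun p => PySem.Set.contains oi.1 p.1),
   pairs.filter (fun p => PySem.Set.contains oi.2 p.1))

-- ===== PRECONDITION & SPEC =====
def Spec_classify_nested_entities (entity_list : List (String × String)) (out : (List (String × String)) × (List (String × String))) : Prop := out = classify_nested_entities_alt entity_list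
instance (entity_list : List (String × String)) (out : (List (String × String)) × (List (String × String))) : Decidable (Spec_classify_nested_entities entity_list out) := by unfold Spec_classify_nested_entities; infer_instance

-- ===== CLAIM (what is proved, stated in full; the proofs are below) =====
def Claim_equal_classify_nested_entities : Prop := ∀ (entity_list : List (String × String)), Dom_classify_nested_entities entity_list → Spec_classify_nested_entities entity_list (classify_nested_entities entity_list)

-- ===== LEMMAS AND PROOFS =====

-- "e is an outer / inner entity of the list": the index-free characterisation.
def outerB (l : List (String × String)) (s : String) : Bool :=
  l.any (fun q => q.1 != s && PySem.Str.isIn q.1 s)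

def innerB (l : List (String × String)) (s : String) : Bool :=
  l.any (fun q => q.1 != s && PySem.Str.isIn s q.1)

theorem contains_eq_true_of_mem {α : Type} [BEq α] [LawfulBEq α] {s : PySem.Set α} {x : α}
    (h : x ∈ s) : PySem.Set.contains s x = true := (PySem.Set.contains_iff s x).mpr h

theorem contains_eq_false_of_not_mem {α : Type} [BEq α] [LawfulBEq α] {s : PySem.Set α} {x : α}
    (h : ¬ x ∈ s) : PySem.Set.contains s x = false := by
  cases hc : PySem.Set.contains s x
  · rfl
  · exact absurd ((PySem.Set.contains_iff s x).mp hc) h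

theorem ofList_filter {α : Type} [BEq α] [LawfulBEq α] (l : List α) (q : α → Bool) :
    PySem.Set.ofList (l.filter q) = (PySem.Set.ofList l).filter q := by
  induction l using List.reverseRecOn with
  | nil => rfl
  | append_singleton l x ih =>
    rw [List.filter_append, PySem.Set.ofList_append_singleton]
    by_cases hx : x ∈ l
    · have hc : PySem.Set.contains (PySem.Set.ofList l) x = true :=
        contains_eq_true_of_mem ((PySem.Set.mem_ofList l x).mpr hx)
      rw [PySem.Set.add, hc]
      cases hq : q x
      · simpa [hq] using ih
      · have hcf : PySem.Set.contains (PySem.Set.ofList (l.filter q)) x = true :=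
          contains_eq_true_of_mem (by
            rw [PySem.Set.mem_ofList]
            exact List.mem_filter.mpr ⟨hx, hq⟩)
        rw [show List.filter q [x] = [x] by simp [hq], PySem.Set.ofList_append_singleton,
            PySem.Set.add, hcf]
        simpa using ih
    · have hc : PySem.Set.contains (PySem.Set.ofList l) x = false :=
        contains_eq_false_of_not_mem (by rw [PySem.Set.mem_ofList]; exact hx)
      rw [PySem.Set.add, hc]
      cases hq : q x
      · simpa [List.filter_append, hq] using ih
      · have hcf : PySem.Set.contains (PySem.Set.ofList (l.filter q)) x = false :=
          contains_eq_false_of_not_mem (by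
            rw [PySem.Set.mem_ofList]
            intro hm
            exact hx (List.mem_filter.mp hm).1)
        rw [show List.filter q [x] = [x] by simp [hq], PySem.Set.ofList_append_singleton,
            PySem.Set.add, hcf]
        simp [List.filter_append, hq, ih]

theorem if_and_or (a b : String) (c f : Bool) :
    (if a ≠ b ∧ c = true then true else f) = (f || (a != b && c)) := by
  by_cases h : a = b
  · simp [h]
  · cases c <;> simp [h, bne_iff_ne]

-- the inner j-loop of A: a pair of boolean "any" accumulators
theorem foldl_pair_or {α : Type} (d1 d2 : α → Bool) (L : List α) (f : Bool × Bool) :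
    L.foldl (fun f x => (f.1 || d1 x, f.2 || d2 x)) f = (f.1 || L.any d1, f.2 || L.any d2) := by
  induction L generalizing f with
  | nil => simp
  | cons y L ih => simp [List.foldl_cons, ih, Bool.or_assoc]

theorem conditional_add_fold (P : String → Bool) (l : List (String × String)) :
    l.foldl (fun s p => if P p.1 then PySem.Set.add s p else s) PySem.Set.empty
      = PySem.Set.ofList (l.filter (fun p => P p.1)) := by
  rw [PySem.List.foldl_if_eq_foldl_filter (fun p => P p.1) PySem.Set.add l PySem.Set.empty]
  rfl

-- A's result, characterised index-free
theorem classify_A_eq (l : List (String × String)) :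
    classify_nested_entities l
      = (PySem.Set.ofList (l.filter (fun p => outerB l p.1)),
         PySem.Set.ofList (l.filter (fun p => innerB l p.1))) := by
  unfold classify_nested_entities
  have hany : ∀ (c : (String × String) → Bool),
      (PySem.List.pyRange 0 (l.length : Int) 1).any
          (fun j => c (PySem.List.pyGetD l j ("", ""))) = l.any c := by
    intro c
    conv_rhs => rw [← PySem.List.map_pyGetD_pyRange_zero l ("", "")]
    rw [List.any_map]
    simp only [PySem.List.len_eq]
    rfl
  have hbody : ∀ (st : PySem.Set (String × String) × PySem.Set (String × String)),
      ∀ i ∈ PySem.List.pyRange 0 (l.length : Int) 1,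
      ((if ((PySem.List.pyRange 0 (l.length : Int) 1).foldl
            (fun (f : Bool × Bool) j =>
              if i == j then f else
              ((if (PySem.List.pyGetD l j ("", "")).1 ≠ (PySem.List.pyGetD l i ("", "")).1 ∧
                   PySem.Str.isIn (PySem.List.pyGetD l j ("", "")).1 (PySem.List.pyGetD l i ("", "")).1
                 then true else f.1),
               (if (PySem.List.pyGetD l j ("", "")).1 ≠ (PySem.List.pyGetD l i ("", "")).1 ∧
                   PySem.Str.isIn (PySem.List.pyGetD l i ("", "")).1 (PySem.List.pyGetD l j ("", "")).1
                 then true else f.2)))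
            (false, false)).1
          then PySem.Set.add st.1 ((PySem.List.pyGetD l i ("", "")).1, (PySem.List.pyGetD l i ("", "")).2)
          else st.1),
       (if ((PySem.List.pyRange 0 (l.length : Int) 1).foldl
            (fun (f : Bool × Bool) j =>
              if i == j then f else
              ((if (PySem.List.pyGetD l j ("", "")).1 ≠ (PySem.List.pyGetD l i ("", "")).1 ∧
                   PySem.Str.isIn (PySem.List.pyGetD l j ("", "")).1 (PySem.List.pyGetD l i ("", "")).1
                 then true else f.1),
               (if (PySem.List.pyGetD l j ("", "")).1 ≠ (PySem.List.pyGetD l i ("", "")).1 ∧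
                   PySem.Str.isIn (PySem.List.pyGetD l i ("", "")).1 (PySem.List.pyGetD l j ("", "")).1
                 then true else f.2)))
            (false, false)).2
          then PySem.Set.add st.2 ((PySem.List.pyGetD l i ("", "")).1, (PySem.List.pyGetD l i ("", "")).2)
          else st.2))
      = ((if outerB l (PySem.List.pyGetD l i ("", "")).1
            then PySem.Set.add st.1 (PySem.List.pyGetD l i ("", "")) else st.1),
         (if innerB l (PySem.List.pyGetD l i ("", "")).1
            then PySem.Set.add st.2 (PySem.List.pyGetD l i ("", "")) else st.2)) := by
    intro st i _
    set e1 := (PySem.List.pyGetD l i ("", "")).1 with he1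
    have hstep : (fun (f : Bool × Bool) (j : Int) =>
          if i == j then f else
          ((if (PySem.List.pyGetD l j ("", "")).1 ≠ e1 ∧
               PySem.Str.isIn (PySem.List.pyGetD l j ("", "")).1 e1 then true else f.1),
           (if (PySem.List.pyGetD l j ("", "")).1 ≠ e1 ∧
               PySem.Str.isIn e1 (PySem.List.pyGetD l j ("", "")).1 then true else f.2)))
        = (fun (f : Bool × Bool) (j : Int) =>
            (f.1 || ((PySem.List.pyGetD l j ("", "")).1 != e1
                      && PySem.Str.isIn (PySem.List.pyGetD l j ("", "")).1 e1),
             f.2 || ((PySem.List.pyGetD l j ("", "")).1 != e1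
                      && PySem.Str.isIn e1 (PySem.List.pyGetD l j ("", "")).1))) := by
      funext f j
      by_cases hij : i == j
      · have hji : (PySem.List.pyGetD l j ("", "")).1 = e1 := by
          rw [he1, show j = i from (eq_of_beq hij).symm]
        simp [hij, hji]
      · simp only [hij, Bool.false_eq_true, if_false, Prod.mk.injEq]
        exact ⟨if_and_or _ _ _ _, if_and_or _ _ _ _⟩
    rw [hstep, foldl_pair_or]
    simp only [Bool.false_or]
    rw [hany (fun q => q.1 != e1 && PySem.Str.isIn q.1 e1),
        hany (fun q => q.1 != e1 && PySem.Str.isIn e1 q.1)]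
    simp [outerB, innerB, he1]
  rw [PySem.List.foldl_congr_mem _ _ _ _ hbody]
  have hfold := PySem.List.foldl_pyRange_zero_pyGetD l ("", "")
    (fun (st : PySem.Set (String × String) × PySem.Set (String × String)) p =>
      ((if outerB l p.1 then PySem.Set.add st.1 p else st.1),
       (if innerB l p.1 then PySem.Set.add st.2 p else st.2)))
    (PySem.Set.empty, PySem.Set.empty)
  simp only [PySem.List.len_eq] at hfold
  rw [hfold]
  rw [PySem.List.foldl_prod_mk (fun s p => if outerB l p.1 then PySem.Set.add s p else s)
       (fun s p => if innerB l p.1 then PySem.Set.add s p else s) l]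
  rw [conditional_add_fold (outerB l), conditional_add_fold (innerB l)]

-- ---- B side ----

-- the uniform step over (container, window length, start) triples of B's triple loop
def tstep (S : PySem.Set String) (st : PySem.Set String × PySem.Set String)
    (a : String × Int × Int) : PySem.Set String × PySem.Set String :=
  let t := PySem.Str.slice a.1 (some a.2.2) (some (a.2.2 + a.2.1))
  if PySem.Set.contains S t then (PySem.Set.add st.1 a.1, PySem.Set.add st.2 t) else st

def tcond (S : PySem.Set String) (a : String × Int × Int) : Bool :=
  PySem.Set.contains S (PySem.Str.slice a.1 (some a.2.2) (some (a.2.2 + a.2.1)))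

def windowList (strings : List String) (lengths : List Int) : List (String × Int × Int) :=
  strings.flatMap (fun s =>
    lengths.flatMap (fun ln =>
      if ln ≥ PySem.Str.len s then []
      else (PySem.List.pyRange 0 (PySem.Str.len s - ln + 1) 1).map (fun i => (s, ln, i))))

-- B's nested loops are the fold of tstep over the flattened window list
theorem nested_eq_windowList (S : PySem.Set String) (strings : List String)
    (lengths : List Int) (init : PySem.Set String × PySem.Set String) :
    strings.foldl
      (fun st s =>
        lengths.foldl
          (fun st ln =>
            if ln ≥ PySem.Str.len s then st
            else
              (PySem.List.pyRange 0 (PySem.Str.len s - ln + 1) 1).foldl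
                (fun st i =>
                  let t := PySem.Str.slice s (some i) (some (i + ln))
                  if PySem.Set.contains S t then
                    (PySem.Set.add st.1 s, PySem.Set.add st.2 t)
                  else st)
                st)
          st)
      init
      = (windowList strings lengths).foldl (tstep S) init := by
  unfold windowList
  rw [List.foldl_flatMap]
  apply PySem.List.foldl_congr_mem
  intro st s _
  rw [List.foldl_flatMap]
  apply PySem.List.foldl_congr_mem
  intro st' ln _
  by_cases h : ln ≥ PySem.Str.len s
  · rw [if_pos h, if_pos h]
    rfl
  · rw [if_neg h, if_neg h, List.foldl_map]
    rfl

-- projections of the tstep fold: two independent conditional-add folds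
theorem foldl_tstep_fst (S : PySem.Set String) (L : List (String × Int × Int))
    (st : PySem.Set String × PySem.Set String) :
    (L.foldl (tstep S) st).1
      = L.foldl (fun s1 a => if tcond S a then PySem.Set.add s1 a.1 else s1) st.1 := by
  induction L generalizing st with
  | nil => rfl
  | cons a L ih =>
    simp only [List.foldl_cons, tstep, tcond]
    split <;> simp_all [tcond]

theorem foldl_tstep_snd (S : PySem.Set String) (L : List (String × Int × Int))
    (st : PySem.Set String × PySem.Set String) :
    (L.foldl (tstep S) st).2
      = L.foldl (fun s2 a => if tcond S a then
            PySem.Set.add s2 (PySem.Str.slice a.1 (some a.2.2) (some (a.2.2 + a.2.1)))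
          else s2) st.2 := by
  induction L generalizing st with
  | nil => rfl
  | cons a L ih =>
    simp only [List.foldl_cons, tstep, tcond]
    split <;> simp_all [tcond]

-- membership in a conditional-add fold
theorem mem_foldl_condAdd {α : Type} (L : List α) (c : α → Bool) (g : α → String)
    (init : PySem.Set String) (x : String) :
    x ∈ L.foldl (fun s a => if c a then PySem.Set.add s (g a) else s) init
      ↔ x ∈ init ∨ ∃ a ∈ L, c a ∧ g a = x := by
  induction L generalizing init with
  | nil => simp
  | cons a L ih =>
    simp only [List.foldl_cons]
    by_cases hc : c a = true
    · rw [if_pos hc, ih]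
      simp only [PySem.Set.mem_add, List.mem_cons]
      constructor
      · rintro ((h | h) | ⟨b, hb, hcb, hgb⟩)
        · exact Or.inl h
        · exact Or.inr ⟨a, Or.inl rfl, hc, h.symm⟩
        · exact Or.inr ⟨b, Or.inr hb, hcb, hgb⟩
      · rintro (h | ⟨b, (rfl | hb), hcb, hgb⟩)
        · exact Or.inl (Or.inl h)
        · exact Or.inl (Or.inr hgb.symm)
        · exact Or.inr ⟨b, hb, hcb, hgb⟩
    · rw [if_neg hc, ih]
      simp only [List.mem_cons]
      constructor
      · rintro (h | ⟨b, hb, hcb, hgb⟩)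
        · exact Or.inl h
        · exact Or.inr ⟨b, Or.inr hb, hcb, hgb⟩
      · rintro (h | ⟨b, (rfl | hb), hcb, hgb⟩)
        · exact Or.inl h
        · exact absurd hcb hc
        · exact Or.inr ⟨b, hb, hcb, hgb⟩

-- membership in the window list
theorem mem_windowList (strings : List String) (lengths : List Int)
    (a : String × Int × Int) :
    a ∈ windowList strings lengths
      ↔ a.1 ∈ strings ∧ a.2.1 ∈ lengths ∧ a.2.1 < PySem.Str.len a.1
        ∧ 0 ≤ a.2.2 ∧ a.2.2 + a.2.1 ≤ PySem.Str.len a.1 := by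
  obtain ⟨s, ln, i⟩ := a
  simp only [windowList, List.mem_flatMap]
  constructor
  · rintro ⟨s', hs', ln', hln', hmem⟩
    by_cases h : ln' ≥ PySem.Str.len s'
    · rw [if_pos h] at hmem
      exact absurd hmem (List.not_mem_nil)
    · rw [if_neg h] at hmem
      rw [List.mem_map] at hmem
      obtain ⟨i', hi', heq⟩ := hmem
      obtain ⟨rfl, rfl, rfl⟩ := Prod.mk.injEq .. ▸ heq
      have hb := (PySem.List.mem_pyRange_one).mp hi'
      exact ⟨hs', hln', by omega, by omega, by omega⟩
  · rintro ⟨hs, hln, hlt, h0, hub⟩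
    refine ⟨s, hs, ln, hln, ?_⟩
    rw [if_neg (by omega)]
    rw [List.mem_map]
    exact ⟨i, (PySem.List.mem_pyRange_one).mpr ⟨h0, by omega⟩, rfl⟩

-- the windows of a string are exactly its infixes of the window's length
theorem window_slice_infix (s : String) (ln i : Int) (h0 : 0 ≤ i) (hln : 0 ≤ ln)
    (hub : i + ln ≤ PySem.Str.len s) :
    (PySem.Str.slice s (some i) (some (i + ln))).toList <:+: s.toList ∧
    (PySem.Str.slice s (some i) (some (i + ln))).toList.length = ln.toNat := by
  have h : (PySem.Str.slice s (some i) (some (i + ln))).toList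
      = (s.toList.drop i.toNat).take ((i + ln).toNat - i.toNat) := by
    rw [PySem.Str.toList_slice, PySem.Chars.slice_eq_listSlice,
        PySem.List.slice_toNat _ h0 (by omega)]
  rw [h]
  have hlen := PySem.Str.len_eq s
  constructor
  · exact (List.take_prefix _ _).isInfix.trans (List.drop_suffix _ _).isInfix
  · rw [List.length_take, List.length_drop]
    omega

theorem infix_exists_window (s t : String) (h : t.toList <:+: s.toList) :
    ∃ i : Int, 0 ≤ i ∧ i + (t.toList.length : Int) ≤ PySem.Str.len s ∧
      PySem.Str.slice s (some i) (some (i + (t.toList.length : Int))) = t := by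
  obtain ⟨u, v, huv⟩ := h
  have hlen : s.toList.length = u.length + t.toList.length + v.length := by
    rw [← huv]; simp [List.length_append]; omega
  refine ⟨(u.length : Int), by positivity, ?_, ?_⟩
  · rw [PySem.Str.len_eq, hlen]
    push_cast
    omega
  · apply String.toList_inj.mp
    rw [PySem.Str.toList_slice, PySem.Chars.slice_eq_listSlice,
        show ((u.length : Int) + (t.toList.length : Int)) = ((u.length + t.toList.length : Nat) : Int) by push_cast; ring,
        PySem.List.slice_natCast]
    have hdrop : s.toList.drop u.length = t.toList ++ v := by
      rw [← huv, List.append_assoc, List.drop_left]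
    rw [hdrop]
    simp

-- abbreviations used only in the lemmas below
def stringsOf (l : List (String × String)) : PySem.Set String :=
  PySem.Set.ofList (l.map (·.1))

def lengthsOf (l : List (String × String)) : PySem.Set Int :=
  PySem.Set.ofList ((stringsOf l).map (fun s => PySem.Str.len s))

theorem mem_stringsOf (l : List (String × String)) (x : String) :
    x ∈ stringsOf l ↔ ∃ q ∈ l, q.1 = x := by
  rw [stringsOf, PySem.Set.mem_ofList]
  simp [List.mem_map]

theorem mem_lengthsOf (l : List (String × String)) (ln : Int) :
    ln ∈ lengthsOf l ↔ ∃ q ∈ l, PySem.Str.len q.1 = ln := by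
  rw [lengthsOf, PySem.Set.mem_ofList, List.mem_map]
  constructor
  · rintro ⟨y, hy, rfl⟩
    obtain ⟨q, hq, rfl⟩ := (mem_stringsOf l y).mp hy
    exact ⟨q, hq, rfl⟩
  · rintro ⟨q, hq, rfl⟩
    exact ⟨q.1, (mem_stringsOf l q.1).mpr ⟨q, hq, rfl⟩, rfl⟩

theorem tcond_iff (l : List (String × String)) (a : String × Int × Int) :
    tcond (stringsOf l) a = true
      ↔ ∃ q ∈ l, q.1 = PySem.Str.slice a.1 (some a.2.2) (some (a.2.2 + a.2.1)) := by
  rw [tcond, PySem.Set.contains_iff, mem_stringsOf]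

-- an infix with the same length is the whole string; strictly shorter otherwise
theorem infix_lt_of_ne (x y : String) (hne : y ≠ x) (hinf : y.toList <:+: x.toList) :
    y.toList.length < x.toList.length := by
  rcases lt_or_eq_of_le hinf.length_le with h | h
  · exact h
  · exact absurd (String.toList_inj.mp (hinf.eq_of_length h)) hne

-- membership characterisation of B's accumulated "outer" string set
theorem mem_oi_fst (l : List (String × String)) (x : String) :
    x ∈ ((windowList (stringsOf l) (lengthsOf l)).foldl (tstep (stringsOf l))
        (PySem.Set.empty, PySem.Set.empty)).1
      ↔ (∃ p ∈ l, p.1 = x) ∧ outerB l x = true := by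
  rw [foldl_tstep_fst, mem_foldl_condAdd]
  simp only [PySem.Set.empty, List.not_mem_nil, false_or]
  constructor
  · rintro ⟨a, ha, hca, rfl⟩
    rw [mem_windowList] at ha
    obtain ⟨hs, hln, hlt, h0, hub⟩ := ha
    obtain ⟨q, hq, hqt⟩ := (tcond_iff l a).mp hca
    obtain ⟨r, hr, hrln⟩ := (mem_lengthsOf l a.2.1).mp hln
    have hln0 : 0 ≤ a.2.1 := by
      rw [← hrln, PySem.Str.len_eq]; positivity
    obtain ⟨hinf, hwlen⟩ := window_slice_infix a.1 a.2.1 a.2.2 h0 hln0 hub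
    refine ⟨(mem_stringsOf l a.1).mp hs, ?_⟩
    rw [outerB, List.any_eq_true]
    refine ⟨q, hq, ?_⟩
    rw [Bool.and_eq_true, bne_iff_ne, PySem.Str.isIn_iff_infix, hqt]
    have hlen1 := PySem.Str.len_eq a.1
    refine ⟨fun h => ?_, hinf⟩
    · have hlenh := congrArg (fun z => z.toList.length) h
      simp only at hlenh
      rw [hwlen] at hlenh
      omega
  · rintro ⟨⟨p, hp, rfl⟩, hout⟩
    rw [outerB, List.any_eq_true] at hout
    obtain ⟨q, hq, hqc⟩ := hout
    rw [Bool.and_eq_true, bne_iff_ne, PySem.Str.isIn_iff_infix] at hqc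
    obtain ⟨hne, hinf⟩ := hqc
    obtain ⟨i, h0, hub, hslice⟩ := infix_exists_window p.1 q.1 hinf
    have hlt := infix_lt_of_ne p.1 q.1 hne hinf
    refine ⟨(p.1, (q.1.toList.length : Int), i), ?_, ?_, rfl⟩
    · rw [mem_windowList]
      have hlen1 := PySem.Str.len_eq p.1
      refine ⟨(mem_stringsOf l p.1).mpr ⟨p, hp, rfl⟩,
        (mem_lengthsOf l _).mpr ⟨q, hq, by rw [PySem.Str.len_eq]⟩, by dsimp only; omega,
        h0, by dsimp only; omega⟩
    · rw [tcond_iff]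
      exact ⟨q, hq, hslice.symm⟩

-- membership characterisation of B's accumulated "inner" string set
theorem mem_oi_snd (l : List (String × String)) (x : String) :
    x ∈ ((windowList (stringsOf l) (lengthsOf l)).foldl (tstep (stringsOf l))
        (PySem.Set.empty, PySem.Set.empty)).2
      ↔ (∃ p ∈ l, p.1 = x) ∧ innerB l x = true := by
  rw [foldl_tstep_snd, mem_foldl_condAdd]
  simp only [PySem.Set.empty, List.not_mem_nil, false_or]
  constructor
  · rintro ⟨a, ha, hca, rfl⟩
    rw [mem_windowList] at ha
    obtain ⟨hs, hln, hlt, h0, hub⟩ := ha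
    obtain ⟨q, hq, hqt⟩ := (tcond_iff l a).mp hca
    obtain ⟨r, hr, hrln⟩ := (mem_lengthsOf l a.2.1).mp hln
    have hln0 : 0 ≤ a.2.1 := by
      rw [← hrln, PySem.Str.len_eq]; positivity
    obtain ⟨hinf, hwlen⟩ := window_slice_infix a.1 a.2.1 a.2.2 h0 hln0 hub
    refine ⟨⟨q, hq, hqt⟩, ?_⟩
    rw [innerB, List.any_eq_true]
    obtain ⟨r', hr', hra⟩ := (mem_stringsOf l a.1).mp hs
    refine ⟨r', hr', ?_⟩
    rw [Bool.and_eq_true, bne_iff_ne, PySem.Str.isIn_iff_infix, hra]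
    have hlen1 := PySem.Str.len_eq a.1
    refine ⟨fun h => ?_, hinf⟩
    · have hlenh := congrArg (fun z => z.toList.length) h
      simp only at hlenh
      rw [hwlen] at hlenh
      omega
  · rintro ⟨⟨p, hp, rfl⟩, hinn⟩
    rw [innerB, List.any_eq_true] at hinn
    obtain ⟨q, hq, hqc⟩ := hinn
    rw [Bool.and_eq_true, bne_iff_ne, PySem.Str.isIn_iff_infix] at hqc
    obtain ⟨hne, hinf⟩ := hqc
    obtain ⟨i, h0, hub, hslice⟩ := infix_exists_window q.1 p.1 hinf
    have hlt := infix_lt_of_ne q.1 p.1 (fun h => hne h.symm) hinf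
    refine ⟨(q.1, (p.1.toList.length : Int), i), ?_, ?_, hslice⟩
    · rw [mem_windowList]
      have hlen1 := PySem.Str.len_eq q.1
      refine ⟨(mem_stringsOf l q.1).mpr ⟨q, hq, rfl⟩,
        (mem_lengthsOf l _).mpr ⟨p, hp, by rw [PySem.Str.len_eq]⟩, by dsimp only; omega,
        h0, by dsimp only; omega⟩
    · rw [tcond_iff]
      exact ⟨p, hp, hslice.symm⟩

-- final characterisation of B
theorem classify_B_eq (l : List (String × String)) :
    classify_nested_entities_alt l
      = ((PySem.Set.ofList l).filter (fun p => outerB l p.1),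
         (PySem.Set.ofList l).filter (fun p => innerB l p.1)) := by
  unfold classify_nested_entities_alt
  dsimp only
  rw [nested_eq_windowList (PySem.Set.ofList (l.map (·.1)))]
  have hstr : PySem.Set.ofList (l.map (·.1)) = stringsOf l := rfl
  have hlen : PySem.Set.ofList ((stringsOf l).map (fun s => PySem.Str.len s)) = lengthsOf l := rfl
  rw [hstr, hlen]
  refine Prod.ext ?_ ?_
  · dsimp only
    apply List.filter_congr
    intro p hp
    rw [Bool.eq_iff_iff, PySem.Set.contains_iff, mem_oi_fst]
    have hpl : p ∈ l := (PySem.Set.mem_ofList l p).mp hp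
    exact ⟨fun h => h.2, fun h => ⟨⟨p, hpl, rfl⟩, h⟩⟩
  · dsimp only
    apply List.filter_congr
    intro p hp
    rw [Bool.eq_iff_iff, PySem.Set.contains_iff, mem_oi_snd]
    have hpl : p ∈ l := (PySem.Set.mem_ofList l p).mp hp
    exact ⟨fun h => h.2, fun h => ⟨⟨p, hpl, rfl⟩, h⟩⟩

-- ===== VERDICT (by name: the statement is the Claim_ definition above) =====
theorem classify_nested_entities_spec : Claim_equal_classify_nested_entities := by
  intro l _
  unfold Spec_classify_nested_entities
  rw [classify_A_eq, classify_B_eq, ofList_filter, ofList_filter]
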